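-- pv_equiv track=rewrite | github.com/Lewis0770/reorganization | mace/database/export/formats.py | _remove_structure_data
-- ===== SOURCE A (Python) =====
-- from typing import List, Dict, Any, Optional, Union
--
-- def _remove_structure_data(data: List[Dict]) -> List[Dict]:
--     """Remove large structure-related fields."""
--     structure_fields = ['structure_json', 'structure_ase', 'atomic_positions',
--                       'initial_atomic_positions', 'final_atomic_positions']
--
--     cleaned = []
--     for record in data:
--         cleaned_record = {}
--         for key, value in record.items():
--             if key not in structure_fields:
--                 cleaned_record[key] = value
--         cleaned.append(cleaned_record)
--     return cleaned
-- ===== SOURCE B (Python) =====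
-- def _remove_structure_data(data):
--     """Remove large structure-related fields."""
--     structure_fields = ['structure_json', 'structure_ase', 'atomic_positions',
--                       'initial_atomic_positions', 'final_atomic_positions']
--
--     def _trim(record):
--         out = dict(record)
--         for field in structure_fields:
--             out.pop(field, None)
--         return out
--
--     return [_trim(record) for record in data]
-- ===== Notes on version B (the rewrite author's own statement) =====
-- stated objective: simpler
-- what changed: Instead of scanning every key of every record and re-inserting the non-structure ones, B shallow-copies each record and pops the five structure field names from the copy, inverting inclusion-filtering into exclusion by the fixed removal set.
import Mathlib
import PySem

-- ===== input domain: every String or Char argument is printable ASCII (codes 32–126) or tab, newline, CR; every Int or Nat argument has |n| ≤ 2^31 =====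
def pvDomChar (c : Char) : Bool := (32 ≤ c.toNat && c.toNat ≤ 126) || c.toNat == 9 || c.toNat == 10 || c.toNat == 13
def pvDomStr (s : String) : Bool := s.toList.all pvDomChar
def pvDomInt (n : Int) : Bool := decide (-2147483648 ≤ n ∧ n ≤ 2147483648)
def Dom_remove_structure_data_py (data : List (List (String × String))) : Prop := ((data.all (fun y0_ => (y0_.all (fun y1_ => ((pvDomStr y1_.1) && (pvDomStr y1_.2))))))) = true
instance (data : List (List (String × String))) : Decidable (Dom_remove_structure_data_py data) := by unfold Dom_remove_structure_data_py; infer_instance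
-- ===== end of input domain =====

-- B copies each record and pops the five structure field names from the copy
-- (exclusion by the fixed removal set) instead of A's re-inserting every
-- non-structure key (inclusion filter); same cost, simpler decomposition.

-- ===== PORT A =====
-- the fixed list of structure field names (shared constant of both versions)
def pvStructureFields : List String :=
  ["structure_json", "structure_ase", "atomic_positions",
   "initial_atomic_positions", "final_atomic_positions"]

def remove_structure_data_py (data : List (List (String × String))) : List (List (String × String)) :=
  data.foldl (fun cleaned record =>
    cleaned ++ [(record.foldl
        (fun cr p => if p.1 ∈ pvStructureFields then cr else cr.insert p.1 p.2)
        (PySem.Dict.empty : PySem.Dict String String)).items]) []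

-- ===== PORT B =====
-- out.pop(field, None): remove the key if present, otherwise leave the dict unchanged
def pvPopNone (d : PySem.Dict String String) (k : String) : PySem.Dict String String :=
  match d.pop? k with
  | some (_, d') => d'
  | none => d

def remove_structure_data_py_alt (data : List (List (String × String))) : List (List (String × String)) :=
  data.map (fun record =>
    (pvStructureFields.foldl pvPopNone (PySem.Dict.ofList record)).items)

-- ===== PRECONDITION & SPEC =====
def Spec_remove_structure_data_py (data : List (List (String × String))) (out : List (List (String × String))) : Prop := out = remove_structure_data_py_alt data
instance (data : List (List (String × String))) (out : List (List (String × String))) : Decidable (Spec_remove_structure_data_py data out) := by unfold Spec_remove_structure_data_py; infer_instance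

-- ===== CLAIM (what is proved, stated in full; the proofs are below) =====
def Claim_equal_remove_structure_data_py : Prop := ∀ (data : List (List (String × String))), Dom_remove_structure_data_py data → Spec_remove_structure_data_py data (remove_structure_data_py data)

-- ===== LEMMAS AND PROOFS =====

-- A's conditional insert loop = plain insert loop over the filtered record
lemma foldl_condInsert_eq_filter (l : List (String × String)) (d : PySem.Dict String String) :
    l.foldl (fun cr p => if p.1 ∈ pvStructureFields then cr else cr.insert p.1 p.2) d
      = (l.filter (fun p => !(decide (p.1 ∈ pvStructureFields)))).foldl
          (fun cr p => cr.insert p.1 p.2) d := by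
  induction l generalizing d with
  | nil => rfl
  | cons p l ih =>
    by_cases h : p.1 ∈ pvStructureFields <;> simp [h, List.foldl, ih]

-- pop(k, None) filters the key out of the items list
lemma pvPopNone_items (d : PySem.Dict String String) (k : String) :
    (pvPopNone d k).items = d.items.filter (fun p => !(p.1 == k)) := by
  unfold pvPopNone PySem.Dict.pop? PySem.Dict.get?
  cases h : List.find? (fun p => p.1 == k) d.items with
  | some p => simp [PySem.Dict.erase]
  | none =>
    simp only [Option.map_none]
    symm
    apply List.filter_eq_self.mpr
    intro a ha
    have := List.find?_eq_none.mp h a ha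
    simpa using this

-- popping a list of keys = one filter by non-membership
lemma foldl_pvPopNone_items (ks : List String) (d : PySem.Dict String String) :
    (ks.foldl pvPopNone d).items = d.items.filter (fun p => !(decide (p.1 ∈ ks))) := by
  induction ks generalizing d with
  | nil => simp
  | cons k ks ih =>
    rw [List.foldl_cons, ih, pvPopNone_items, List.filter_filter]
    apply List.filter_congr
    intro a _
    by_cases h : a.1 = k <;> simp [h]

-- replacing the value at a key the filter drops does not change the filtered list
lemma filter_map_replace_of_neg (predK : String → Bool) (k : String) (v : String)
    (hk : predK k = false) (t : List (String × String)) :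
    (t.map (fun q => if q.1 == k then (k, v) else q)).filter (fun q => predK q.1)
      = t.filter (fun q => predK q.1) := by
  induction t with
  | nil => rfl
  | cons a t iht =>
    simp only [beq_iff_eq] at iht
    by_cases ha : a.1 = k
    · simp [ha, hk, iht]
    · simp only [beq_iff_eq, List.map_cons, if_neg ha, List.filter_cons, iht]

-- replacing the value at a key the filter keeps commutes with the filter
lemma filter_map_replace_of_pos (predK : String → Bool) (k : String) (v : String)
    (hk : predK k = true) (t : List (String × String)) :
    (t.map (fun q => if q.1 == k then (k, v) else q)).filter (fun q => predK q.1)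
      = (t.filter (fun q => predK q.1)).map (fun q => if q.1 == k then (k, v) else q) := by
  induction t with
  | nil => rfl
  | cons a t iht =>
    simp only [beq_iff_eq] at iht ⊢
    by_cases ha : a.1 = k
    · simp [ha, hk, iht]
    · by_cases hpa : predK a.1 <;> simp [ha, hpa, iht]

-- a kept key is present in the filtered list iff it is present in the original
lemma any_filter_of_pos (predK : String → Bool) (k : String) (hk : predK k = true)
    (t : List (String × String)) :
    (t.filter (fun q => predK q.1)).any (fun q => q.1 == k) = t.any (fun q => q.1 == k) := by
  induction t with
  | nil => rfl
  | cons a t iht =>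
    simp only [beq_iff_eq] at iht
    by_cases ha : a.1 = k
    · simp [ha, hk]
    · by_cases hpa : predK a.1 <;> simp [ha, hpa, iht]

-- key-stable predicate commutes with a fold of inserts (at the items level)
lemma filter_foldl_insert (predK : String → Bool) (l : List (String × String))
    (d : PySem.Dict String String) :
    (l.foldl (fun cr p => cr.insert p.1 p.2) d).items.filter (fun p => predK p.1)
      = ((l.filter (fun p => predK p.1)).foldl (fun cr p => cr.insert p.1 p.2)
          (PySem.Dict.mk (d.items.filter (fun p => predK p.1)))).items := by
  induction l generalizing d with
  | nil => rfl
  | cons p l ih =>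
    by_cases hp : predK p.1
    · rw [List.filter_cons_of_pos (by simpa using hp), List.foldl_cons, List.foldl_cons, ih]
      congr 2
      unfold PySem.Dict.insert PySem.Dict.contains
      have hc' := any_filter_of_pos predK p.1 (by simpa using hp) d.items
      by_cases hc : (d.items.any fun q => q.1 == p.1) = true
      · simp only [hc', hc, if_true]
        exact congrArg PySem.Dict.mk
          (filter_map_replace_of_pos predK p.1 p.2 (by simpa using hp) d.items)
      · have hcf : (d.items.any fun q => q.1 == p.1) = false := eq_false_of_ne_true hc
        simp only [hc', hcf, Bool.false_eq_true, if_false]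
        exact congrArg PySem.Dict.mk (by simp [List.filter_append, hp])
    · rw [List.filter_cons_of_neg (by simpa using hp), List.foldl_cons, ih]
      congr 2
      unfold PySem.Dict.insert PySem.Dict.contains
      by_cases hc : (d.items.any fun q => q.1 == p.1) = true
      · simp only [hc, if_true]
        exact congrArg PySem.Dict.mk
          (filter_map_replace_of_neg predK p.1 p.2 (by simpa using hp) d.items)
      · have hcf : (d.items.any fun q => q.1 == p.1) = false := eq_false_of_ne_true hc
        simp only [hcf, Bool.false_eq_true, if_false]
        exact congrArg PySem.Dict.mk
          (by simp [List.filter_append, show predK p.1 = false by simpa using hp])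

-- the per-record results of the two ports coincide
lemma per_record_eq (record : List (String × String)) :
    (record.foldl
        (fun cr p => if p.1 ∈ pvStructureFields then cr else cr.insert p.1 p.2)
        (PySem.Dict.empty : PySem.Dict String String)).items
      = (pvStructureFields.foldl pvPopNone (PySem.Dict.ofList record)).items := by
  rw [foldl_condInsert_eq_filter, foldl_pvPopNone_items]
  have h := filter_foldl_insert (fun s => !(decide (s ∈ pvStructureFields))) record
    (PySem.Dict.empty : PySem.Dict String String)
  simp only [PySem.Dict.empty, List.filter_nil] at h
  rw [PySem.Dict.ofList, PySem.Dict.update]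
  exact h.symm

-- ===== VERDICT (by name: the statement is the Claim_ definition above) =====
theorem remove_structure_data_py_spec : Claim_equal_remove_structure_data_py := by
  intro data _
  unfold Spec_remove_structure_data_py remove_structure_data_py remove_structure_data_py_alt
  rw [PySem.List.foldl_append_eq_flatMap]
  simp only [List.nil_append, per_record_eq]
  exact Eq.symm List.map_eq_flatMap
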